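-- pv_equiv track=rewrite | github.com/auybing2002123/PropBot | backend/app/agent/tools/policy.py | _extract_relevant_section
-- ===== SOURCE A (Python) =====
-- def _extract_relevant_section(
--
--     content: str,
--     query: str,
--     stage: str | None
-- ) -> str:
--     """提取与查询相关的内容段落"""
--     # 按段落分割
--     paragraphs = content.split("\n\n")
--
--     # 查找包含关键词的段落
--     query_terms = query.lower().split()
--     if stage:
--         query_terms.append(stage.lower())
--
--     relevant_paragraphs = []
--     for para in paragraphs:
--         para_lower = para.lower()
--         score = sum(1 for term in query_terms if term in para_lower)
--         if score > 0:
--             relevant_paragraphs.append((score, para))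
--
--     # 按相关度排序
--     relevant_paragraphs.sort(key=lambda x: x[0], reverse=True)
--
--     # 返回最相关的段落（限制长度）
--     if relevant_paragraphs:
--         result = "\n\n".join(p[1] for p in relevant_paragraphs[:2])
--         return result[:800] if len(result) > 800 else result
--
--     # 如果没有匹配，返回开头部分
--     return content[:500] + "..." if len(content) > 500 else content
-- ===== SOURCE B (Python) =====
-- def _bump(best, second, score, para):
--     if best is None or score > best[0]:
--         return (score, para), best
--     if second is None or score > second[0]:
--         return best, (score, para)
--     return best, second
--
--
-- def _extract_relevant_section(
--     content: str,
--     query: str,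
--     stage: str | None
-- ) -> str:
--     """One pass over the paragraphs keeping the two best (score, para) slots
--     instead of building and sorting a full scored list."""
--     terms = query.lower().split()
--     if stage:
--         terms.append(stage.lower())
--
--     best = None
--     second = None
--     for para in content.split("\n\n"):
--         para_lower = para.lower()
--         score = len([t for t in terms if t in para_lower])
--         if score > 0:
--             best, second = _bump(best, second, score, para)
--
--     if best is None:
--         return content[:500] + "..." if len(content) > 500 else content
--
--     picked = [best[1]] if second is None else [best[1], second[1]]
--     result = "\n\n".join(picked)
--     return result[:800] if len(result) > 800 else result
-- ===== Notes on version B (the rewrite author's own statement) =====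
-- stated objective: alternative
-- what changed: B replaces A's build-full-scored-list-then-stable-reverse-sort-and-take-two with a single pass over the paragraphs maintaining two (score, para) slots updated by strict comparisons, which reproduces the stable descending order's top two.
import Mathlib
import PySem

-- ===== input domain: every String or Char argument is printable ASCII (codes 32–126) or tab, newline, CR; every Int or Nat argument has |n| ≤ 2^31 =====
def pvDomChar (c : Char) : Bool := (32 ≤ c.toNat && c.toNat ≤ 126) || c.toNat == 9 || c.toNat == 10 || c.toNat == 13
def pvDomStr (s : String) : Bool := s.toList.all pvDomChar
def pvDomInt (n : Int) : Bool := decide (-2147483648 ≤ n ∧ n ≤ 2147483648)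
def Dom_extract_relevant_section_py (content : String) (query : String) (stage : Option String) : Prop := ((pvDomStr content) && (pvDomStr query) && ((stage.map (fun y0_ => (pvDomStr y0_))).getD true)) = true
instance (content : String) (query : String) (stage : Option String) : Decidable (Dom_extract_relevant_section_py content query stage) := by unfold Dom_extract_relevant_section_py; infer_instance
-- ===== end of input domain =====

-- B scans the paragraphs once keeping two best-(score,para) slots instead of sorting the full scored list (alternative decomposition, same results).


-- ===== PORT A =====
-- query.lower().split() plus stage.lower() when stage is truthy (shared shape of both Pythons)
def pvTermsA (query : String) (stage : Option String) : List String :=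
  let qt := PySem.Str.split₀ (PySem.Str.lower query)
  match stage with
  | some s => if s ≠ "" then qt ++ [PySem.Str.lower s] else qt
  | none => qt

-- score = sum(1 for term in query_terms if term in para_lower)
def pvScoreA (terms : List String) (paraLower : String) : Int :=
  terms.foldl (fun n t => if PySem.Str.isIn t paraLower then n + 1 else n) 0

-- the relevant_paragraphs list A accumulates
def pvRelevantA (terms : List String) (paras : List String) : List (Int × String) :=
  paras.foldl (fun acc para =>
    let score := pvScoreA terms (PySem.Str.lower para)
    if score > 0 then acc ++ [(score, para)] else acc) []

def extract_relevant_section_py (content : String) (query : String) (stage : Option String) : String :=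
  let paragraphs := (PySem.Str.split? content "\n\n").getD []
  let query_terms := pvTermsA query stage
  let relevant := pvRelevantA query_terms paragraphs
  let relevant := PySem.List.sorted relevant (fun x => x.1) true
  if relevant ≠ [] then
    let result := PySem.Str.join "\n\n" ((PySem.List.slice relevant none (some 2)).map (fun p => p.2))
    if PySem.Str.len result > 800 then PySem.Str.slice result none (some 800) else result
  else
    if PySem.Str.len content > 500 then PySem.Str.slice content none (some 500) ++ "..." else content

-- ===== PORT B =====
def pvTermsB (query : String) (stage : Option String) : List String :=
  let qt := PySem.Str.split₀ (PySem.Str.lower query)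
  match stage with
  | some s => if s ≠ "" then qt ++ [PySem.Str.lower s] else qt
  | none => qt

-- score = len([t for t in terms if t in para_lower])
def pvScoreB (terms : List String) (paraLower : String) : Int :=
  ((terms.filter (fun t => PySem.Str.isIn t paraLower)).length : Int)

-- _bump from Source B: install (score, para) into the two slots with strict comparisons
def pvBump (best second : Option (Int × String)) (score : Int) (para : String) :
    Option (Int × String) × Option (Int × String) :=
  if best.elim true (fun b => score > b.1) then (some (score, para), best)
  else if second.elim true (fun s => score > s.1) then (best, some (score, para))
  else (best, second)

-- the one-pass slot fold of Source B
def pvSlots (terms : List String) (paras : List String) :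
    Option (Int × String) × Option (Int × String) :=
  paras.foldl (fun st para =>
    let score := pvScoreB terms (PySem.Str.lower para)
    if score > 0 then pvBump st.1 st.2 score para else st) (none, none)

def extract_relevant_section_py_alt (content : String) (query : String) (stage : Option String) : String :=
  let terms := pvTermsB query stage
  let slots := pvSlots terms ((PySem.Str.split? content "\n\n").getD [])
  match slots with
  | (none, _) =>
    if PySem.Str.len content > 500 then PySem.Str.slice content none (some 500) ++ "..." else content
  | (some b, none) =>
    let result := PySem.Str.join "\n\n" [b.2]
    if PySem.Str.len result > 800 then PySem.Str.slice result none (some 800) else result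
  | (some b, some s) =>
    let result := PySem.Str.join "\n\n" [b.2, s.2]
    if PySem.Str.len result > 800 then PySem.Str.slice result none (some 800) else result

-- ===== PRECONDITION & SPEC =====
def Spec_extract_relevant_section_py (content : String) (query : String) (stage : Option String) (out : String) : Prop := out = extract_relevant_section_py_alt content query stage
instance (content : String) (query : String) (stage : Option String) (out : String) : Decidable (Spec_extract_relevant_section_py content query stage out) := by unfold Spec_extract_relevant_section_py; infer_instance

-- ===== CLAIM (what is proved, stated in full; the proofs are below) =====
def Claim_equal_extract_relevant_section_py : Prop := ∀ (content : String) (query : String) (stage : Option String), Dom_extract_relevant_section_py content query stage → Spec_extract_relevant_section_py content query stage (extract_relevant_section_py content query stage)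

-- ===== LEMMAS AND PROOFS =====

-- the two scoring styles agree
lemma pvScore_eq (terms : List String) (p : String) : pvScoreA terms p = pvScoreB terms p := by
  unfold pvScoreA pvScoreB
  suffices h : ∀ (n : Int), terms.foldl (fun n t => if PySem.Str.isIn t p then n + 1 else n) n
      = n + ((terms.filter (fun t => PySem.Str.isIn t p)).length : Int) by
    simpa using h 0
  induction terms with
  | nil => intro n; simp
  | cons t ts ih =>
    intro n
    rw [List.foldl_cons, List.filter_cons]
    by_cases ht : PySem.Str.isIn t p = true
    · rw [if_pos ht, if_pos ht, ih, List.length_cons]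
      push_cast
      ring
    · rw [if_neg ht, if_neg ht, ih]

-- inserting into a (reverse-)sorted accumulator moves the first two slots exactly as pvBump does
lemma firstTwo_insertBy (x : Int × String) (s : List (Int × String)) :
    ((PySem.List.insertBy (fun a b => decide (b.1 < a.1)) x s)[0]?,
     (PySem.List.insertBy (fun a b => decide (b.1 < a.1)) x s)[1]?)
      = pvBump s[0]? s[1]? x.1 x.2 := by
  match s with
  | [] => simp [PySem.List.insertBy, pvBump]
  | [a] =>
    by_cases h : a.1 < x.1
    · simp [PySem.List.insertBy, pvBump, h, gt_iff_lt]
    · simp [PySem.List.insertBy, pvBump, h, gt_iff_lt]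
  | a :: b :: t =>
    by_cases h1 : a.1 < x.1
    · simp [PySem.List.insertBy, pvBump, h1, gt_iff_lt]
    · by_cases h2 : b.1 < x.1
      · simp [PySem.List.insertBy, pvBump, h1, h2, gt_iff_lt]
      · simp [PySem.List.insertBy, pvBump, h1, h2, gt_iff_lt]

-- folding insertBy, seen through the first two slots, is the pvBump fold
lemma foldl_insertBy_firstTwo (L : List (Int × String)) : ∀ s : List (Int × String),
    ((L.foldl (fun acc x => PySem.List.insertBy (fun a b => decide (b.1 < a.1)) x acc) s)[0]?,
      (L.foldl (fun acc x => PySem.List.insertBy (fun a b => decide (b.1 < a.1)) x acc) s)[1]?)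
      = L.foldl (fun st x => pvBump st.1 st.2 x.1 x.2) (s[0]?, s[1]?) := by
  induction L with
  | nil => intro s; simp
  | cons x L ih =>
    intro s
    have h := firstTwo_insertBy x s
    simp only [List.foldl_cons]
    rw [ih, ← h]

-- A's accumulation equals acc ++ (the filterMap of positively scored paragraphs)
lemma relevantA_eq (terms : List String) (paras : List String) :
    pvRelevantA terms paras
      = paras.filterMap (fun para =>
          let score := pvScoreA terms (PySem.Str.lower para)
          if score > 0 then some (score, para) else none) := by
  unfold pvRelevantA
  suffices h : ∀ acc : List (Int × String),
      paras.foldl (fun acc para =>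
        let score := pvScoreA terms (PySem.Str.lower para)
        if score > 0 then acc ++ [(score, para)] else acc) acc
      = acc ++ paras.filterMap (fun para =>
          let score := pvScoreA terms (PySem.Str.lower para)
          if score > 0 then some (score, para) else none) by
    simpa using h []
  induction paras with
  | nil => intro acc; simp
  | cons p ps ih =>
    intro acc
    by_cases hp : pvScoreA terms (PySem.Str.lower p) > 0
    · simp [hp, ih]
    · simp [hp, ih]

-- B's one-pass fold is the pvBump fold over that same filterMap list
lemma slots_eq_foldl (terms : List String) (paras : List String) :
    ∀ st : Option (Int × String) × Option (Int × String),
    paras.foldl (fun st para =>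
        let score := pvScoreB terms (PySem.Str.lower para)
        if score > 0 then pvBump st.1 st.2 score para else st) st
      = (paras.filterMap (fun para =>
          let score := pvScoreA terms (PySem.Str.lower para)
          if score > 0 then some (score, para) else none)).foldl
            (fun st x => pvBump st.1 st.2 x.1 x.2) st := by
  induction paras with
  | nil => intro st; simp
  | cons p ps ih =>
    intro st
    by_cases hp : pvScoreA terms (PySem.Str.lower p) > 0
    · simp only [List.foldl_cons, List.filterMap_cons]
      rw [← pvScore_eq]
      simp [hp, ih]
    · simp only [List.foldl_cons, List.filterMap_cons]
      rw [← pvScore_eq]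
      simp [hp, ih]

-- the central fact: B's slots are the first two entries of A's sorted relevant list
lemma slots_eq_firstTwo_sorted (terms : List String) (paras : List String) :
    ((PySem.List.sorted (pvRelevantA terms paras) (fun x => x.1) true)[0]?,
     (PySem.List.sorted (pvRelevantA terms paras) (fun x => x.1) true)[1]?)
      = pvSlots terms paras := by
  unfold pvSlots
  rw [slots_eq_foldl, ← relevantA_eq,
    PySem.List.sorted_rev_eq_foldl_insertBy (pvRelevantA terms paras) (fun x => x.1)]
  have h := foldl_insertBy_firstTwo (pvRelevantA terms paras) []
  simpa using h

-- slice [:2] of the sorted list described through its first two entries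
lemma take_two_of_firstTwo (l : List (Int × String)) :
    PySem.List.slice l none (some 2) = (l.take 2) := by
  have : ((2:Int)) = ((2:Nat) : Int) := by norm_num
  rw [this, PySem.List.slice_to_natCast]

theorem extract_relevant_section_py_spec_aux (content : String) (query : String) (stage : Option String) :
    extract_relevant_section_py content query stage = extract_relevant_section_py_alt content query stage := by
  simp only [extract_relevant_section_py, extract_relevant_section_py_alt]
  rw [show pvTermsB = pvTermsA from rfl, take_two_of_firstTwo, ← slots_eq_firstTwo_sorted]
  cases hsrt : PySem.List.sorted
      (pvRelevantA (pvTermsA query stage) ((PySem.Str.split? content "\n\n").getD []))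
      (fun x => x.1) true with
  | nil => simp
  | cons a t =>
    cases t with
    | nil => simp
    | cons b t' => simp

-- ===== VERDICT (by name: the statement is the Claim_ definition above) =====
theorem extract_relevant_section_py_spec : Claim_equal_extract_relevant_section_py := by
  intro content query stage _
  exact extract_relevant_section_py_spec_aux content query stage
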